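-- pv_equiv track=rewrite | github.com/haasonsaas/email-agent | src/email_agent/agents/sentiment_analyzer.py | _extract_key_phrases
-- ===== SOURCE A (Python) =====
-- from typing import Dict, Any, List
--
-- def _extract_key_phrases(text: str, negative_words: List[str],
--                        positive_words: List[str], urgency_words: List[str]) -> List[str]:
--     """Extract key emotional phrases from text."""
--     phrases = []
--
--     # Find emotional words in context
--     words = text.split()
--     for i, word in enumerate(words):
--         if word in negative_words or word in positive_words or word in urgency_words:
--             # Get surrounding context
--             start = max(0, i - 2)
--             end = min(len(words), i + 3)
--             phrase = ' '.join(words[start:end])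
--             phrases.append(phrase)
--
--     return phrases[:5]  # Limit to top 5 phrases
-- ===== SOURCE B (Python) =====
-- def _extract_key_phrases(text, negative_words, positive_words, urgency_words):
--     """Keyword-major: collect the occurrence positions of each distinct emotional word,
--     then sort the union of positions and render the first five context windows."""
--     words = text.split()
--     occ = [i
--            for w in dict.fromkeys(negative_words + positive_words + urgency_words)
--            for i, x in enumerate(words) if x == w]
--     return [' '.join(words[max(0, i - 2):min(len(words), i + 3)])
--             for i in sorted(occ)[:5]]
-- ===== Notes on version B (the rewrite author's own statement) =====
-- stated objective: alternative
-- what changed: B inverts the traversal: instead of A's single position-major scan that emits phrases inline and truncates at 5, B iterates keyword-major over the deduplicated emotional vocabulary, gathers each keyword's occurrence positions, sorts the union of positions, takes the first five, and only then renders the context windows.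
import Mathlib
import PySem

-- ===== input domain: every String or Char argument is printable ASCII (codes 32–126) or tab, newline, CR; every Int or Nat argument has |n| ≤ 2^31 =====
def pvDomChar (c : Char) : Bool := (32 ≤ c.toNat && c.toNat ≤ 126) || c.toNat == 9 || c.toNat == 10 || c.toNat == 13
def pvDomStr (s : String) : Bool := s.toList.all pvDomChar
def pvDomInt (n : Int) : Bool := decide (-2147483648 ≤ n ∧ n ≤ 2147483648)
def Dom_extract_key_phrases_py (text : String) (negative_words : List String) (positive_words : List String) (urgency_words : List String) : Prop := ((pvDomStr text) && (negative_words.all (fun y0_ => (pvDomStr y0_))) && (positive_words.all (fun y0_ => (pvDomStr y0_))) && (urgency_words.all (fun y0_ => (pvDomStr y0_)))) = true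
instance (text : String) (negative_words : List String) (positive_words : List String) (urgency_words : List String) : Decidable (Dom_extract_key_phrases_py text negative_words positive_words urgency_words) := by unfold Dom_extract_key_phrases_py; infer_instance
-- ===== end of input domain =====

-- B inverts A's traversal (keyword-major occurrence collection, then sort the positions and render); same return value everywhere.

-- shared helper: ' '.join(words[max(0, i-2):min(len(words), i+3)]) — identical expression in both Pythons
def pvPhrase (words : List String) (i : Int) : String :=
  PySem.Str.join " " (PySem.List.slice words (some (max 0 (i - 2))) (some (min (words.length : Int) (i + 3))))

-- ===== PORT A =====
def extract_key_phrases_py (text : String) (negative_words : List String) (positive_words : List String) (urgency_words : List String) : List String :=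
  let words := PySem.Str.split₀ text
  let phrases := (PySem.List.enumerate words 0).foldl
    (fun phrases p =>
      if negative_words.contains p.2 || positive_words.contains p.2 || urgency_words.contains p.2
      then phrases ++ [pvPhrase words p.1] else phrases) []
  PySem.List.slice phrases none (some 5)

-- ===== PORT B =====
def extract_key_phrases_py_alt (text : String) (negative_words : List String) (positive_words : List String) (urgency_words : List String) : List String :=
  let words := PySem.Str.split₀ text
  let occ := (PySem.List.dedup (negative_words ++ positive_words ++ urgency_words)).flatMap
    (fun w => (PySem.List.enumerate words 0).filterMap
      (fun p => if p.2 == w then some p.1 else none))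
  ((PySem.List.sorted occ (fun x => x) false).take 5).map (pvPhrase words)

-- ===== PRECONDITION & SPEC =====
def Spec_extract_key_phrases_py (text : String) (negative_words : List String) (positive_words : List String) (urgency_words : List String) (out : List String) : Prop := out = extract_key_phrases_py_alt text negative_words positive_words urgency_words
instance (text : String) (negative_words : List String) (positive_words : List String) (urgency_words : List String) (out : List String) : Decidable (Spec_extract_key_phrases_py text negative_words positive_words urgency_words out) := by unfold Spec_extract_key_phrases_py; infer_instance

-- ===== CLAIM (what is proved, stated in full; the proofs are below) =====
def Claim_equal_extract_key_phrases_py : Prop := ∀ (text : String) (negative_words : List String) (positive_words : List String) (urgency_words : List String), Dom_extract_key_phrases_py text negative_words positive_words urgency_words → Spec_extract_key_phrases_py text negative_words positive_words urgency_words (extract_key_phrases_py text negative_words positive_words urgency_words)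

-- ===== LEMMAS AND PROOFS =====

-- filtering by two disjoint predicates and concatenating is a permutation of filtering by their disjunction
lemma pv_filter_disjoint_perm {α : Type} (p q : α → Bool) (h : ∀ a, p a = true → q a = false) :
    ∀ l : List α, (l.filter p ++ l.filter q).Perm (l.filter (fun a => p a || q a)) := by
  intro l
  induction l with
  | nil => simp
  | cons a l ih =>
    by_cases hp : p a = true
    · simp [hp, h a hp]
      exact ih
    · simp only [Bool.not_eq_true] at hp
      by_cases hq : q a = true
      · simp only [List.filter_cons, hp, hq, Bool.false_or, if_pos, if_neg, Bool.false_eq_true,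
          not_false_iff]
        exact List.perm_middle.trans (ih.cons a)
      · simp only [Bool.not_eq_true] at hq
        simp [hp, hq, ih]

-- keyword-major collection over a duplicate-free vocabulary permutes the position-major filter
lemma pv_flatMap_filter_perm {α : Type} [DecidableEq α] (l : List (Int × α)) :
    ∀ ks : List α, ks.Nodup →
      (ks.flatMap (fun w => l.filter (fun p => p.2 == w))).Perm
        (l.filter (fun p => ks.contains p.2)) := by
  intro ks
  induction ks with
  | nil => simp
  | cons w ks ih =>
    intro hnd
    rcases List.nodup_cons.mp hnd with ⟨hw, hnd'⟩
    simp only [List.flatMap_cons]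
    refine ((ih hnd').append_left _).trans ?_
    refine (pv_filter_disjoint_perm _ _ ?_ l).trans ?_
    · intro p hp
      simp only [beq_iff_eq] at hp
      simp [hp, hw]
    · apply List.Perm.of_eq
      apply List.filter_congr
      intro p _
      by_cases h : p.2 = w
      · simp [h]
      · simp [h]

-- the filterMap in B is 'filter then take the index'
lemma pv_filterMap_eq {α : Type} [DecidableEq α] (l : List (Int × α)) (w : α) :
    l.filterMap (fun p => if p.2 == w then some p.1 else none)
      = (l.filter (fun p => p.2 == w)).map (·.1) := by
  induction l with
  | nil => rfl
  | cons a l ih =>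
    rw [List.filterMap_cons, List.filter_cons]
    by_cases h : (a.2 == w) = true
    · rw [if_pos h, if_pos h, List.map_cons, ih]
    · rw [if_neg h, if_neg h, ih]

-- the three-way membership test equals membership in the deduplicated concatenation
lemma pv_mem_eq (negative_words positive_words urgency_words : List String) (w : String) :
    (negative_words.contains w || positive_words.contains w || urgency_words.contains w)
      = (PySem.List.dedup (negative_words ++ positive_words ++ urgency_words)).contains w := by
  simp only [List.contains_eq_mem]
  simp [Bool.or_assoc]

-- ===== VERDICT (by name: the statement is the Claim_ definition above) =====
theorem extract_key_phrases_py_spec : Claim_equal_extract_key_phrases_py := by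
  intro text negative_words positive_words urgency_words _
  unfold Spec_extract_key_phrases_py extract_key_phrases_py extract_key_phrases_py_alt
  dsimp only
  set words := PySem.Str.split₀ text with hwords
  set ks := PySem.List.dedup (negative_words ++ positive_words ++ urgency_words) with hks
  rw [PySem.List.foldl_append_if
        (fun p : Int × String =>
          negative_words.contains p.2 || positive_words.contains p.2 || urgency_words.contains p.2)
        (fun p : Int × String => pvPhrase words p.1)]
  rw [PySem.List.slice_to _ (show (0:Int) ≤ 5 by norm_num)]
  have hfil : (PySem.List.enumerate words 0).filter
        (fun p => negative_words.contains p.2 || positive_words.contains p.2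
                    || urgency_words.contains p.2)
      = (PySem.List.enumerate words 0).filter (fun p => ks.contains p.2) :=
    List.filter_congr (fun p _ => pv_mem_eq negative_words positive_words urgency_words p.2)
  have hsorted : PySem.List.sorted
      (ks.flatMap (fun w => (PySem.List.enumerate words 0).filterMap
        (fun p => if p.2 == w then some p.1 else none))) (fun x => x) false
      = ((PySem.List.enumerate words 0).filter (fun p => ks.contains p.2)).map (·.1) := by
    apply PySem.List.sorted_eq_of_perm_of_pairwise_lt
    · simp only [pv_filterMap_eq, ← List.map_flatMap]
      exact ((pv_flatMap_filter_perm (PySem.List.enumerate words 0) ks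
        (hks ▸ PySem.List.nodup_dedup _)).map (·.1)).symm
    · exact ((PySem.List.pairwise_lt_enumerate words 0).filter _).map _ (fun _ _ h => h)
  rw [hsorted, hfil]
  simp [List.map_take, List.map_map, Function.comp_def]
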